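-- pv_equiv track=rewrite | github.com/ground-creative/easy-mcp-core-python | utils/tools.py | group_tools_by_tag
-- ===== SOURCE A (Python) =====
-- from typing import List, Dict, Any
--
-- def group_tools_by_tag(
--     tool_functions: List[Dict[str, Any]],
-- ) -> Dict[str, List[Dict[str, Any]]]:
--     grouped_tools = {}
--
--     # Group tools by their tags
--     for tool in tool_functions:
--         tag = tool["tags"]  # Assuming tags are stored as a string
--         if tag not in grouped_tools:
--             grouped_tools[tag] = []  # Initialize the list for the tag
--         grouped_tools[tag].append(tool)  # Add the tool to the corresponding tag list
--
--     # Sort the dictionary by tag (keys) alphabetically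
--     sorted_grouped_tools = dict(sorted(grouped_tools.items()))
--
--     # Sort functions within each tag alphabetically by their names
--     for tag in sorted_grouped_tools:
--         sorted_grouped_tools[tag].sort(
--             key=lambda x: x["name"].lower()
--         )  # Sort alphabetically, case insensitive
--
--     return sorted_grouped_tools
-- ===== SOURCE B (Python) =====
-- from typing import List, Dict, Any
--
-- def group_tools_by_tag(
--     tool_functions: List[Dict[str, Any]],
-- ) -> Dict[str, List[Dict[str, Any]]]:
--     # One stable sort by (tag, lowercased name), then a single grouping pass:
--     # keys appear in ascending tag order and each group is already name-sorted.
--     ordered = sorted(tool_functions, key=lambda t: (t["tags"], t["name"].lower()))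
--     grouped = {}
--     for tool in ordered:
--         grouped.setdefault(tool["tags"], []).append(tool)
--     return grouped
-- ===== Notes on version B (the rewrite author's own statement) =====
-- stated objective: alternative
-- what changed: A groups first, then sorts the dict items by tag and each group by lowercased name; B does one stable sort of the whole list by the composite key (tag, name.lower()) and then a single grouping pass with setdefault, needing no post-grouping sorts.
import Mathlib
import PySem

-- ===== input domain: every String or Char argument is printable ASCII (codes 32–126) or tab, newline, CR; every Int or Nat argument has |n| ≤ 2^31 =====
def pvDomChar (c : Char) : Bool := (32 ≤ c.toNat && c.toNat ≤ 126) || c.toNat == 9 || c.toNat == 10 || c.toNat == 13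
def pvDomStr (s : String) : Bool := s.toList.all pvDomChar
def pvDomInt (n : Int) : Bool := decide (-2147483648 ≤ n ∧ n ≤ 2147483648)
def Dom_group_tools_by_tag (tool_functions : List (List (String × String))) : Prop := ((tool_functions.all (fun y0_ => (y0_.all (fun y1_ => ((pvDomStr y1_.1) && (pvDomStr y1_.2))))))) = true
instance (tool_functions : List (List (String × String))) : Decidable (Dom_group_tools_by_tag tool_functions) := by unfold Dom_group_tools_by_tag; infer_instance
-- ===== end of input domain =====

-- B replaces A's group-then-sort-twice scheme by one stable sort on the composite key
-- (tag, name.lower()) followed by a single grouping pass (objective: alternative decomposition).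

-- Shared helpers: tool["tags"] and tool["name"].lower().  Under Pre_ both keys are present,
-- so the getD default "" is never used (Python raises KeyError exactly where it would be; Pre_ excludes that).
def tagOfTool (t : List (String × String)) : String := (PySem.Dict.mk t).getD "tags" ""
def nameKeyOfTool (t : List (String × String)) : String := PySem.Str.lower ((PySem.Dict.mk t).getD "name" "")

-- ===== PORT A =====
-- Python A: group by tag with "if tag not in grouped: grouped[tag] = []" + append,
-- then dict(sorted(grouped.items())) (keys are distinct, so the tuple comparison is decided by the key),
-- then an in-place sort of each group by name.lower().
def group_tools_by_tag (tool_functions : List (List (String × String))) : List (String × List (List (String × String))) :=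
  let grouped := tool_functions.foldl (fun d tool =>
    let tag := tagOfTool tool
    let d := if d.contains tag then d else d.insert tag ([] : List (List (String × String)))
    d.modify tag [] (fun v => v ++ [tool])) PySem.Dict.empty
  let sortedItems := PySem.List.sorted grouped.items (fun p => p.1)
  sortedItems.map (fun p => (p.1, PySem.List.sorted p.2 nameKeyOfTool))

-- ===== PORT B =====
-- Source B: ordered = sorted(tool_functions, key=lambda t: (t["tags"], t["name"].lower()));
-- then one pass: grouped.setdefault(t["tags"], []).append(t)  (setdefault+append = modify with default []).
def group_tools_by_tag_alt (tool_functions : List (List (String × String))) : List (String × List (List (String × String))) :=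
  let ordered := PySem.List.sorted2 tool_functions tagOfTool nameKeyOfTool
  (ordered.foldl (fun d tool =>
    d.modify (tagOfTool tool) [] (fun v => v ++ [tool])) PySem.Dict.empty).items

-- ===== PRECONDITION & SPEC =====
-- Pre_ excludes exactly the inputs where Python A raises KeyError: a tool missing the "tags" or "name" key.
def Pre_group_tools_by_tag (tool_functions : List (List (String × String))) : Prop :=
  ∀ tool ∈ tool_functions, (PySem.Dict.mk tool).contains "tags" = true ∧ (PySem.Dict.mk tool).contains "name" = true
instance (tool_functions : List (List (String × String))) : Decidable (Pre_group_tools_by_tag tool_functions) := by unfold Pre_group_tools_by_tag; infer_instance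
def pvWitness_group_tools_by_tag : (List (List (String × String))) :=
  [[("tags", "math"), ("name", "Add")], [("tags", "math"), ("name", "abs")], [("tags", "io"), ("name", "read")]]

def Spec_group_tools_by_tag (tool_functions : List (List (String × String))) (out : List (String × List (List (String × String)))) : Prop := out = group_tools_by_tag_alt tool_functions
instance (tool_functions : List (List (String × String))) (out : List (String × List (List (String × String)))) : Decidable (Spec_group_tools_by_tag tool_functions out) := by unfold Spec_group_tools_by_tag; infer_instance

-- ===== CLAIM (what is proved, stated in full; the proofs are below) =====
def Claim_equal_group_tools_by_tag : Prop := ∀ (tool_functions : List (List (String × String))), Dom_group_tools_by_tag tool_functions → Pre_group_tools_by_tag tool_functions → Spec_group_tools_by_tag tool_functions (group_tools_by_tag tool_functions)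

-- ===== LEMMAS AND PROOFS =====

-- generic facts about insertion sort (PySem.List.insertBy) under a strict-weak-order test B

lemma insertBy_cons {α : Type} (B : α → α → Bool) (x y : α) (l : List α) :
    PySem.List.insertBy B x (y :: l) = if B x y then x :: y :: l else y :: PySem.List.insertBy B x l := by
  simp [PySem.List.insertBy]

/-- Inserting an element that `p` rejects does not change the `p`-filtered list. -/
lemma filter_insertBy_neg {α : Type} (B : α → α → Bool) (p : α → Bool) (x : α)
    (hx : p x = false) : ∀ l : List α, (PySem.List.insertBy B x l).filter p = l.filter p := by
  intro l
  induction l with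
  | nil => simp [PySem.List.insertBy, hx]
  | cons y ys ih =>
    rw [insertBy_cons]
    split_ifs with h
    · simp [List.filter, hx]
    · simp [List.filter, ih]

/-- `insertBy` preserves sortedness (`Pairwise` of the negated test, read backwards). -/
lemma pairwise_insertBy {α : Type} (B : α → α → Bool)
    (hasym : ∀ a b, B a b = true → B b a = false)
    (hneg : ∀ a b c, B a b = false → B b c = false → B a c = false)
    (x : α) (l : List α) (h : l.Pairwise (fun a b => B b a = false)) :
    (PySem.List.insertBy B x l).Pairwise (fun a b => B b a = false) := by
  induction l with
  | nil => simp [PySem.List.insertBy]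
  | cons y ys ih =>
    rcases List.pairwise_cons.mp h with ⟨hy, hys⟩
    rw [insertBy_cons]
    split_ifs with hxy
    · refine List.Pairwise.cons ?_ (List.Pairwise.cons hy hys)
      intro z hz
      rcases List.mem_cons.mp hz with rfl | hz
      · exact hasym _ _ hxy
      · by_contra hzx
        have hzx' : B z x = true := by revert hzx; cases hB : B z x <;> simp
        have h1 : B z y = false := hy z hz
        have hyx : B y x = false := hasym _ _ hxy
        have h2 := hneg z y x h1 hyx
        simp [hzx'] at h2
    · refine List.Pairwise.cons ?_ (ih hys)
      intro z hz
      rcases (PySem.List.mem_insertBy _ _ _ _).mp hz with rfl | hz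
      · simpa using hxy
      · exact hy z hz

/-- Stability: filtering a class on which `B` agrees with `C` out of a `B`-sorted list
commutes with `insertBy`. -/
lemma filter_insertBy_pos {α : Type} (B C : α → α → Bool) (p : α → Bool)
    (hneg : ∀ a b c, B a b = false → B b c = false → B a c = false)
    (hBC : ∀ a b, p a = true → p b = true → B a b = C a b)
    (x : α) (hx : p x = true) :
    ∀ l : List α, l.Pairwise (fun a b => B b a = false) →
      (PySem.List.insertBy B x l).filter p = PySem.List.insertBy C x (l.filter p) := by
  intro l
  induction l with
  | nil => intro _; simp [PySem.List.insertBy, hx]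
  | cons y ys ih =>
    intro h
    rcases List.pairwise_cons.mp h with ⟨hy, hys⟩
    rw [insertBy_cons]
    split_ifs with hxy
    · cases hpy : p y with
      | true =>
        have : C x y = true := (hBC x y hx hpy) ▸ hxy
        simp [List.filter, hx, hpy, insertBy_cons, this]
      | false =>
        simp only [List.filter, hx, hpy]
        cases hf : ys.filter p with
        | nil => simp [PySem.List.insertBy]
        | cons z zs =>
          have hz : z ∈ ys ∧ p z = true := by
            have : z ∈ ys.filter p := by rw [hf]; exact List.mem_cons_self
            exact ⟨List.mem_of_mem_filter this, List.of_mem_filter this⟩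
          have hzy : B z y = false := hy z hz.1
          have hBxz : B x z = true := by
            by_contra hbc
            have hxz : B x z = false := by revert hbc; cases hB : B x z <;> simp
            have := hneg x z y hxz hzy
            simp [hxy] at this
          have hCxz : C x z = true := (hBC x z hx hz.2) ▸ hBxz
          rw [insertBy_cons, if_pos hCxz]
    · cases hpy : p y with
      | true =>
        have hC : C x y = false := (hBC x y hx hpy) ▸ (by simpa using hxy)
        simp only [List.filter, hpy]
        rw [insertBy_cons, if_neg (by simp [hC]), ih hys]
      | false =>
        simp only [List.filter, hpy]
        exact ih hys

/-- Filtering a whole insertion-sort fold. -/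
lemma filter_foldl_insertBy {α : Type} (B C : α → α → Bool) (p : α → Bool)
    (hasym : ∀ a b, B a b = true → B b a = false)
    (hneg : ∀ a b c, B a b = false → B b c = false → B a c = false)
    (hBC : ∀ a b, p a = true → p b = true → B a b = C a b) :
    ∀ (xs acc : List α), acc.Pairwise (fun a b => B b a = false) →
      ((xs.foldl (fun a x => PySem.List.insertBy B x a) acc).filter p)
        = (xs.filter p).foldl (fun a x => PySem.List.insertBy C x a) (acc.filter p) := by
  intro xs
  induction xs with
  | nil => intro acc _; simp
  | cons x xs ih =>
    intro acc hacc
    simp only [List.foldl_cons, List.filter]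
    cases hp : p x with
    | true =>
      rw [ih _ (pairwise_insertBy B hasym hneg x acc hacc),
        filter_insertBy_pos B C p hneg hBC x hp acc hacc]
      simp
    | false =>
      rw [ih _ (pairwise_insertBy B hasym hneg x acc hacc), filter_insertBy_neg B p x hp acc]

lemma foldl_insertBy_pairwise {α : Type} (B : α → α → Bool)
    (hasym : ∀ a b, B a b = true → B b a = false)
    (hneg : ∀ a b c, B a b = false → B b c = false → B a c = false)
    (xs : List α) : ∀ (acc : List α), acc.Pairwise (fun a b => B b a = false) →
    (xs.foldl (fun a x => PySem.List.insertBy B x a) acc).Pairwise (fun a b => B b a = false) := by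
  induction xs with
  | nil => intro acc h; simpa using h
  | cons x xs ih =>
    intro acc h
    exact ih _ (pairwise_insertBy B hasym hneg x acc h)

/-- `insertBy` commutes with `map` when the test factors through the map. -/
lemma insertBy_map {α β : Type} (B : α → α → Bool) (B' : β → β → Bool) (g : α → β)
    (hBg : ∀ a b, B' (g a) (g b) = B a b) (x : α) :
    ∀ l : List α, PySem.List.insertBy B' (g x) (l.map g) = (PySem.List.insertBy B x l).map g := by
  intro l
  induction l with
  | nil => simp [PySem.List.insertBy]
  | cons y ys ih =>
    simp only [List.map_cons]
    rw [insertBy_cons, insertBy_cons, hBg]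
    split_ifs <;> simp [ih]

lemma foldl_insertBy_map {α β : Type} (B : α → α → Bool) (B' : β → β → Bool) (g : α → β)
    (hBg : ∀ a b, B' (g a) (g b) = B a b) :
    ∀ (ks acc : List α), ((ks.map g).foldl (fun a x => PySem.List.insertBy B' x a) (acc.map g))
      = (ks.foldl (fun a k => PySem.List.insertBy B k a) acc).map g := by
  intro ks
  induction ks with
  | nil => intro acc; simp
  | cons k ks ih =>
    intro acc
    simp only [List.map_cons, List.foldl_cons]
    rw [insertBy_map B B' g hBg k acc, ih]

lemma ofList_sublist {α : Type} [BEq α] [LawfulBEq α] : ∀ xs : List α, (PySem.Set.ofList xs).Sublist xs := by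
  intro xs
  induction xs with
  | nil => simp [PySem.Set.ofList]
  | cons x xs ih =>
    rw [PySem.Set.ofList_cons]
    exact List.Sublist.cons₂ x (List.filter_sublist.trans ih)

-- the lexicographic test used by sorted2 on our two String keys: asymmetric and negatively transitive
lemma lt2_asym {α : Type} (k1 k2 : α → String) (a b : α) :
    (decide (k1 a < k1 b) || (!decide (k1 b < k1 a) && decide (k2 a < k2 b))) = true →
    (decide (k1 b < k1 a) || (!decide (k1 a < k1 b) && decide (k2 b < k2 a))) = false := by
  simp only [Bool.or_eq_true, Bool.and_eq_true, Bool.not_eq_true', decide_eq_true_eq,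
    decide_eq_false_iff_not, Bool.or_eq_false_iff, Bool.and_eq_false_iff]
  rintro (h | ⟨h1, h2⟩)
  · exact ⟨lt_asymm h, Or.inl (by simpa using h)⟩
  · exact ⟨by simpa using h1, Or.inr (by simpa using lt_asymm h2)⟩
lemma lt2_negtrans {α : Type} (k1 k2 : α → String) (a b c : α) :
    (decide (k1 a < k1 b) || (!decide (k1 b < k1 a) && decide (k2 a < k2 b))) = false →
    (decide (k1 b < k1 c) || (!decide (k1 c < k1 b) && decide (k2 b < k2 c))) = false →
    (decide (k1 a < k1 c) || (!decide (k1 c < k1 a) && decide (k2 a < k2 c))) = false := by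
  simp only [Bool.or_eq_false_iff, Bool.and_eq_false_iff, Bool.not_eq_false', decide_eq_true_eq,
    decide_eq_false_iff_not]
  rintro ⟨h1, h1'⟩ ⟨h2, h2'⟩
  have hba : k1 b ≤ k1 a := not_lt.mp h1
  have hcb : k1 c ≤ k1 b := not_lt.mp h2
  refine ⟨not_lt.mpr (hcb.trans hba), ?_⟩
  by_cases hca : k1 c < k1 a
  · exact Or.inl (by simpa using hca)
  · have hac : k1 a = k1 c := le_antisymm (not_lt.mp hca) (hcb.trans hba)
    have hab : k1 a = k1 b := le_antisymm (hac ▸ hcb) hba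
    have n1 : ¬ k2 a < k2 b := by
      rcases h1' with h | h
      · rw [hab] at h; exact absurd h (lt_irrefl _)
      · simpa using h
    have n2 : ¬ k2 b < k2 c := by
      rcases h2' with h | h
      · rw [← hab, hac] at h; exact absurd h (lt_irrefl _)
      · simpa using h
    exact Or.inr (by simpa using not_lt.mpr ((not_lt.mp n2).trans (not_lt.mp n1)))

-- the canonical form both ports reduce to
def canonGroups (xs : List (List (String × String))) : List (String × List (List (String × String))) :=
  (PySem.List.sorted (PySem.Set.ofList (xs.map tagOfTool)) (fun k => k)).map
    (fun k => (k, PySem.List.sorted (xs.filter (fun t => tagOfTool t == k)) nameKeyOfTool))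

lemma grouping_items (l : List (List (String × String))) :
    (l.foldl (fun d tool => d.modify (tagOfTool tool) [] (fun v => v ++ [tool])) PySem.Dict.empty).items
      = (PySem.Set.ofList (l.map tagOfTool)).map
          (fun k => (k, l.filter (fun t => tagOfTool t == k))) := by
  have hkeys : (l.foldl (fun d tool => d.modify (tagOfTool tool) [] (fun v => v ++ [tool])) PySem.Dict.empty).keys
      = PySem.Set.ofList (l.map tagOfTool) := by
    rw [PySem.Dict.keys_foldl_modify_key l tagOfTool [] (fun _ x => fun v => v ++ [x]) PySem.Dict.empty]
    simp [PySem.Set.update_nil_left]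
  have hget : ∀ k, (l.foldl (fun d tool => d.modify (tagOfTool tool) [] (fun v => v ++ [tool])) PySem.Dict.empty).getD k []
      = l.filter (fun t => tagOfTool t == k) := by
    intro k
    have h := PySem.Dict.getD_foldl_modify_append (l.map (fun t => (tagOfTool t, t)))
      PySem.Dict.empty k
    rw [List.foldl_map] at h
    simp only [List.filter_map, List.map_map, Function.comp_def] at h
    simpa using h
  rw [PySem.Dict.items_eq_map_keys _ (by rw [hkeys]; exact PySem.Set.nodup_ofList _) [], hkeys]
  simp only [hget]

-- the keys of B's grouping dict are exactly A's sorted tag list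
lemma keys_eq_sorted_tags (xs : List (List (String × String))) :
    PySem.Set.ofList ((PySem.List.sorted2 xs tagOfTool nameKeyOfTool).map tagOfTool)
      = PySem.List.sorted (PySem.Set.ofList (xs.map tagOfTool)) (fun k => k) := by
  apply List.Perm.eq_of_pairwise (le := fun a b => a ≤ b)
  · exact fun a b _ _ h h' => le_antisymm h h'
  · -- Pairwise ≤ on the deduplicated projection of the sorted2 list
    have hpw : (PySem.List.sorted2 xs tagOfTool nameKeyOfTool).Pairwise
        (fun a b => (fun a b => decide (tagOfTool a < tagOfTool b) ||
          (!decide (tagOfTool b < tagOfTool a) && decide (nameKeyOfTool a < nameKeyOfTool b))) b a = false) := by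
      simp only [PySem.List.sorted2, Bool.false_eq_true, if_false]
      exact foldl_insertBy_pairwise _ (lt2_asym tagOfTool nameKeyOfTool)
        (lt2_negtrans tagOfTool nameKeyOfTool) xs [] (List.Pairwise.nil)
    have hmap : ((PySem.List.sorted2 xs tagOfTool nameKeyOfTool).map tagOfTool).Pairwise
        (fun a b => a ≤ b) := by
      rw [List.pairwise_map]
      refine hpw.imp ?_
      intro a b h
      simp only [Bool.or_eq_false_iff, decide_eq_false_iff_not] at h
      exact not_lt.mp h.1
    exact List.Pairwise.sublist (ofList_sublist _) hmap
  · have := PySem.List.sorted_pairwise (PySem.Set.ofList (xs.map tagOfTool)) (fun k => k)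
    simpa using this
  · have hn1 : (PySem.Set.ofList ((PySem.List.sorted2 xs tagOfTool nameKeyOfTool).map tagOfTool)).Nodup :=
      PySem.Set.nodup_ofList _
    have hn2 : (PySem.List.sorted (PySem.Set.ofList (xs.map tagOfTool)) (fun k => k)).Nodup :=
      (PySem.List.sorted_perm _ _ _).symm.nodup (PySem.Set.nodup_ofList _)
    rw [List.perm_ext_iff_of_nodup hn1 hn2]
    intro a
    simp only [PySem.Set.mem_ofList, (PySem.List.sorted_perm _ _ _).mem_iff,
      ((PySem.List.sorted2_perm xs tagOfTool nameKeyOfTool false).map tagOfTool).mem_iff]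

-- B's groups are A's name-sorted groups (stability of the composite sort)
lemma filter_sorted2 (xs : List (List (String × String))) (k : String) :
    (PySem.List.sorted2 xs tagOfTool nameKeyOfTool).filter (fun t => tagOfTool t == k)
      = PySem.List.sorted (xs.filter (fun t => tagOfTool t == k)) nameKeyOfTool := by
  simp only [PySem.List.sorted2, PySem.List.sorted, Bool.false_eq_true, if_false]
  have h := filter_foldl_insertBy
    (fun a b => decide (tagOfTool a < tagOfTool b) ||
      (!decide (tagOfTool b < tagOfTool a) && decide (nameKeyOfTool a < nameKeyOfTool b)))
    (fun a b => decide (nameKeyOfTool a < nameKeyOfTool b))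
    (fun t => tagOfTool t == k)
    (lt2_asym tagOfTool nameKeyOfTool) (lt2_negtrans tagOfTool nameKeyOfTool)
    ?_ xs [] List.Pairwise.nil
  · simpa using h
  · intro a b ha hb
    have ha' : tagOfTool a = k := by simpa using ha
    have hb' : tagOfTool b = k := by simpa using hb
    simp [ha', hb']

lemma portA_eq_canon (xs : List (List (String × String))) : group_tools_by_tag xs = canonGroups xs := by
  unfold group_tools_by_tag canonGroups
  have hstep : (fun (d : PySem.Dict String (List (List (String × String)))) tool =>
      let tag := tagOfTool tool
      let d := if d.contains tag then d else d.insert tag ([] : List (List (String × String)))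
      d.modify tag [] (fun v => v ++ [tool]))
      = (fun d tool => d.modify (tagOfTool tool) [] (fun v => v ++ [tool])) := by
    funext d tool
    by_cases h : d.contains (tagOfTool tool) = true
    · simp [h]
    · simp only [Bool.not_eq_true] at h
      simp [h, PySem.Dict.modify, PySem.Dict.getD_insert_self,
        PySem.Dict.insert_insert_self, PySem.Dict.getD_of_not_contains _ _ h]
  simp only [hstep]
  rw [grouping_items xs]
  -- sorting the items by their first component = sorting the keys
  simp only [PySem.List.sorted, Bool.false_eq_true, if_false]
  rw [show ((PySem.Set.ofList (xs.map tagOfTool)).map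
        (fun k => (k, xs.filter (fun t => tagOfTool t == k))))
      = ((PySem.Set.ofList (xs.map tagOfTool) : List String).map
        (fun k => (k, xs.filter (fun t => tagOfTool t == k)))) from rfl]
  rw [show ([] : List (String × List (List (String × String))))
      = (([] : List String).map (fun k => (k, xs.filter (fun t => tagOfTool t == k)))) from rfl]
  rw [foldl_insertBy_map (fun a b => decide (a < b))
    (fun a b => decide (a.1 < b.1)) (fun k => (k, xs.filter (fun t => tagOfTool t == k)))
    (fun a b => rfl)]
  simp [List.map_map, Function.comp]

lemma portB_eq_canon (xs : List (List (String × String))) : group_tools_by_tag_alt xs = canonGroups xs := by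
  unfold group_tools_by_tag_alt canonGroups
  simp only []
  rw [grouping_items, keys_eq_sorted_tags]
  simp only [filter_sorted2]

-- ===== VERDICT (by name: the statement is the Claim_ definition above) =====
theorem group_tools_by_tag_spec : Claim_equal_group_tools_by_tag := by
  intro xs _ _
  unfold Spec_group_tools_by_tag
  rw [portA_eq_canon, portB_eq_canon]
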